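-- pv_equiv track=rewrite | github.com/kentxchang-goedutw/youtube_sub_tools | youtube_subtitle_tool.py | extract_available_formats
-- ===== SOURCE A (Python) =====
-- from typing import Any, Callable, Dict, List, Optional, Tuple
--
-- def extract_available_formats(formats: List[Dict[str, Any]]) -> List[str]:
--     """
--     取得字幕可用格式。
--
--     Args:
--         formats: yt-dlp 字幕格式列表。
--
--     Returns:
--         格式清單。
--     """
--     result: List[str] = []
--
--     for item in formats:
--         ext = str(item.get("ext") or "").strip()
--         if ext and ext not in result:
--             result.append(ext)
--
--     order = ["srt", "vtt", "json3", "srv1", "srv2", "srv3", "ttml"]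
--     return sorted(result, key=lambda value: order.index(value) if value in order else len(order))
-- ===== SOURCE B (Python) =====
-- from typing import Any, Dict, List
--
--
-- def extract_available_formats(formats: List[Dict[str, Any]]) -> List[str]:
--     """Staged passes: extract all exts once, read the known ones off the
--     priority table by membership, then append unknown exts deduped by a
--     prefix check in first-appearance order (no sort, no seen-set)."""
--     order = ["srt", "vtt", "json3", "srv1", "srv2", "srv3", "ttml"]
--     exts = [str(item.get("ext") or "").strip() for item in formats]
--     result = [e for e in order if e in exts]
--     for i in range(len(exts)):
--         x = exts[i]
--         if x and x not in order and x not in exts[:i]: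
--             result.append(x)
--     return result
-- ===== Notes on version B (the rewrite author's own statement) =====
-- stated objective: alternative
-- what changed: Replaces A's incremental dedup-list build followed by a keyed sort with staged passes: map every item to its stripped ext once, read the known exts directly off the fixed priority table by membership in that ext list, and collect unknown exts in appearance order deduped by a prefix-membership check (no sort, no incremental result list).
import Mathlib
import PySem

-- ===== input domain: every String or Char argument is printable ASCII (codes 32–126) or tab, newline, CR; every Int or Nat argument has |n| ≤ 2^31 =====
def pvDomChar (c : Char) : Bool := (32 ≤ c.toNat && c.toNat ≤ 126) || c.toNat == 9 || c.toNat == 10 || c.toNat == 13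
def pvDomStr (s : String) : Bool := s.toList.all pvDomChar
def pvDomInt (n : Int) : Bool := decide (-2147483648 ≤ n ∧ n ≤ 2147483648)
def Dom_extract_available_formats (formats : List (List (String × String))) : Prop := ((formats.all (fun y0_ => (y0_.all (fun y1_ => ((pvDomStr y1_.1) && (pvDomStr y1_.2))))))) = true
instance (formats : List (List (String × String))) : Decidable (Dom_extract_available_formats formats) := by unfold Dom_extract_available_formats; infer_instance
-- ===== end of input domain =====

-- B replaces A's incremental dedup list plus keyed sort by staged passes: map to exts once,
-- read known exts off the fixed priority table, append prefix-deduped unknown exts (no sort).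

-- ===== PORT A =====
-- order list (a local constant in the Python)
def pvOrder : List String := ["srt", "vtt", "json3", "srv1", "srv2", "srv3", "ttml"]

-- the sort key lambda: order.index(value) if value in order else len(order)
-- (.getD 0 is only reached under the 'value in order' guard, where index? is some)
def pvKeyA (value : String) : Int :=
  if pvOrder.contains value then (((PySem.List.index? pvOrder value).getD 0 : Nat) : Int)
  else (pvOrder.length : Int)

-- ext = str(item.get("ext") or "").strip()
def pvExtA (item : List (String × String)) : String :=
  PySem.Str.strip (((PySem.Dict.mk item).get? "ext").getD "")

-- loop body of A: if ext and ext not in result: append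
def pvStepA (result : List String) (item : List (String × String)) : List String :=
  if (pvExtA item != "") && !(result.contains (pvExtA item)) then result ++ [pvExtA item]
  else result

def extract_available_formats (formats : List (List (String × String))) : List String :=
  PySem.List.sorted (formats.foldl pvStepA []) pvKeyA

-- ===== PORT B =====
def pvOrderB : List String := ["srt", "vtt", "json3", "srv1", "srv2", "srv3", "ttml"]

-- "for i in range(len(exts)): x = exts[i]; if x and x not in order and x not in exts[:i]: append x"
-- transliterated as structural recursion over the ext list carrying the processed prefix exts[:i]
def pvUnknownLoop (pre : List String) : List String → List String
  | [] => []
  | x :: rest =>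
    if x != "" && !(pvOrderB.contains x) && !(pre.contains x)
    then x :: pvUnknownLoop (pre ++ [x]) rest
    else pvUnknownLoop (pre ++ [x]) rest

def extract_available_formats_alt (formats : List (List (String × String))) : List String :=
  -- exts = [str(item.get("ext") or "").strip() for item in formats]
  let exts := formats.map (fun item => PySem.Str.strip (((PySem.Dict.mk item).get? "ext").getD ""))
  pvOrderB.filter (fun e => exts.contains e) ++ pvUnknownLoop [] exts

-- ===== PRECONDITION & SPEC =====
def Spec_extract_available_formats (formats : List (List (String × String))) (out : List String) : Prop := out = extract_available_formats_alt formats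
instance (formats : List (List (String × String))) (out : List String) : Decidable (Spec_extract_available_formats formats out) := by unfold Spec_extract_available_formats; infer_instance

-- ===== CLAIM (what is proved, stated in full; the proofs are below) =====
def Claim_equal_extract_available_formats : Prop := ∀ (formats : List (List (String × String))), Dom_extract_available_formats formats → Spec_extract_available_formats formats (extract_available_formats formats)

-- ===== LEMMAS AND PROOFS =====

theorem pv_insertBy_cons (before : String → String → Bool) (x y : String) (ys : List String) :
    PySem.List.insertBy before x (y :: ys) =
      if before x y then x :: y :: ys else y :: PySem.List.insertBy before x ys := rfl

theorem pv_insertBy_front (before : String → String → Bool) (x : String) (L : List String)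
    (h : ∀ y ∈ L, before x y = true) : PySem.List.insertBy before x L = x :: L := by
  cases L with
  | nil => rfl
  | cons y ys => rw [pv_insertBy_cons, if_pos (h y (List.mem_cons_self ..))]

-- inserting a known ext into (known-part ++ unknown-part) lands at its priority slot
theorem pv_ins_lemma (key : String → Int) :
    ∀ (os : List String) (p : String → Bool) (U : List String) (x : String),
      os.Pairwise (fun a b => key a < key b) → x ∈ os → p x = false →
      (∀ u ∈ U, key x < key u) →
      PySem.List.insertBy (fun a b => decide (key a < key b)) x (os.filter p ++ U)
        = os.filter (fun e => p e || e == x) ++ U := by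
  intro os
  induction os with
  | nil => intro p U x _ hx; exact absurd hx (List.not_mem_nil)
  | cons o os' ih =>
    intro p U x hpw hx hpx hU
    have hrel := (List.pairwise_cons.mp hpw).1
    have hpw' := (List.pairwise_cons.mp hpw).2
    rcases List.mem_cons.mp hx with rfl | hx'
    · have hxnot : ∀ e ∈ os', e ≠ x := by
        intro e he heq; exact absurd (heq ▸ hrel e he) (lt_irrefl _)
      have hfc : os'.filter (fun e => p e || e == x) = os'.filter p := by
        apply List.filter_congr
        intro e he
        have : (e == x) = false := beq_eq_false_iff_ne.mpr (hxnot e he)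
        simp [this]
      simp only [List.filter_cons, hpx, Bool.false_or, beq_self_eq_true, if_pos]
      rw [hfc]
      have : PySem.List.insertBy (fun a b => decide (key a < key b)) x (os'.filter p ++ U)
          = x :: (os'.filter p ++ U) := by
        apply pv_insertBy_front
        intro y hy
        rcases List.mem_append.mp hy with hy1 | hy2
        · exact decide_eq_true (hrel y (List.mem_of_mem_filter hy1))
        · exact decide_eq_true (hU y hy2)
      simpa using this
    · have hkox : key o < key x := hrel x hx'
      have hox : (o == x) = false := by
        apply beq_eq_false_iff_ne.mpr
        intro heq; exact absurd (heq ▸ hkox) (lt_irrefl _)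
      by_cases hpo : p o = true
      · have hq : (p o || o == x) = true := by simp [hpo]
        rw [List.filter_cons, if_pos hpo, List.filter_cons, if_pos hq, List.cons_append,
            List.cons_append, pv_insertBy_cons, if_neg (by simp; omega)]
        rw [ih p U x hpw' hx' hpx hU]
      · have hpo' : p o = false := by simpa using hpo
        have hq : (p o || o == x) = false := by simp [hpo', hox]
        rw [List.filter_cons, if_neg (by simp [hpo']), List.filter_cons, if_neg (by simp [hq])]
        exact ih p U x hpw' hx' hpx hU

theorem pv_order_pairwise : pvOrder.Pairwise (fun a b => pvKeyA a < pvKeyA b) := by decide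

theorem pv_key_lt (x : String) (h : x ∈ pvOrder) : pvKeyA x < 7 := by
  fin_cases h <;> decide

theorem pv_key_not_mem (x : String) (h : x ∉ pvOrder) : pvKeyA x = 7 := by
  simp [pvKeyA, h]; rfl

-- the sorted result of A's dedup list is exactly priority-known ++ unknowns-in-order
theorem pv_sorted_eq (r : List String) (hr : r.Nodup) :
    PySem.List.sorted r pvKeyA
      = pvOrder.filter (fun e => r.contains e) ++ r.filter (fun e => !(pvOrder.contains e)) := by
  induction r using List.reverseRecOn with
  | nil => simp [PySem.List.sorted]
  | append_singleton r x ih =>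
    have hx : x ∉ r := by simp [List.nodup_append] at hr; tauto
    have hrn : r.Nodup := (List.nodup_append.mp hr).1
    rw [PySem.List.sorted_eq_foldl_insertBy, List.foldl_append] at *
    simp only [List.foldl_cons, List.foldl_nil]
    rw [ih hrn]
    by_cases hmem : x ∈ pvOrder
    · have h1 : PySem.List.insertBy (fun a b => decide (pvKeyA a < pvKeyA b)) x
          (pvOrder.filter (fun e => r.contains e) ++ r.filter (fun e => !(pvOrder.contains e)))
          = pvOrder.filter (fun e => r.contains e || e == x)
            ++ r.filter (fun e => !(pvOrder.contains e)) := by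
        apply pv_ins_lemma pvKeyA pvOrder _ _ x pv_order_pairwise hmem (by simp [hx])
        intro u hu
        have hun : u ∉ pvOrder := by
          have := List.of_mem_filter hu
          simpa using this
        rw [pv_key_not_mem u hun]
        exact pv_key_lt x hmem
      rw [h1]
      congr 1
      · apply List.filter_congr
        intro e _
        by_cases hex : e = x <;> simp [hex]
      · rw [List.filter_append]
        have : [x].filter (fun e => !(pvOrder.contains e)) = [] := by
          simp [hmem]
        rw [this, List.append_nil]
    · have hall : ∀ y ∈ pvOrder.filter (fun e => r.contains e)
          ++ r.filter (fun e => !(pvOrder.contains e)),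
          (fun a b => decide (pvKeyA a < pvKeyA b)) x y = false := by
        intro y hy
        have hx7 : pvKeyA x = 7 := pv_key_not_mem x hmem
        have hnot : ¬ pvKeyA x < pvKeyA y := by
          rcases List.mem_append.mp hy with hy1 | hy2
          · have := pv_key_lt y (List.mem_of_mem_filter hy1); omega
          · have hyn : y ∉ pvOrder := by
              have := List.of_mem_filter hy2
              simpa using this
            rw [pv_key_not_mem y hyn]; omega
        simpa using hnot
      rw [PySem.List.insertBy_of_forall_not_before _ _ _ hall]
      rw [List.append_assoc]
      congr 1
      · apply List.filter_congr
        intro e he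
        have hex : e ≠ x := fun h => hmem (h ▸ he)
        simp [hex]
      · rw [List.filter_append]
        congr 1
        simp [hmem]

-- A's loop keeps the dedup list nodup
theorem pv_nodupA : ∀ (fs : List (List (String × String))) (r : List String),
    r.Nodup → (fs.foldl pvStepA r).Nodup := by
  intro fs
  induction fs with
  | nil => intro r h; exact h
  | cons f fs' ih =>
    intro r h
    simp only [List.foldl_cons]
    apply ih
    unfold pvStepA
    split
    · rename_i hcond
      have hni : pvExtA f ∉ r := by
        simp at hcond; exact hcond.2
      exact h.append (List.nodup_singleton _)
        (by intro a ha hb; simp at hb; subst hb; exact hni ha)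
    · exact h

-- A's fold only looks at the ext of each item: restate it as a fold over the ext list
def pvStepE (result : List String) (x : String) : List String :=
  if (x != "") && !(result.contains x) then result ++ [x] else result

theorem pv_foldA_map : ∀ (fs : List (List (String × String))) (r : List String),
    fs.foldl pvStepA r = (fs.map pvExtA).foldl pvStepE r := by
  intro fs
  induction fs with
  | nil => intro r; rfl
  | cons f fs' ih => intro r; simp only [List.foldl_cons, List.map_cons]; exact ih _

-- unfolding equation for the prefix-dedup loop
theorem pvUnknownLoop_cons (pre : List String) (x : String) (es : List String) :
    pvUnknownLoop pre (x :: es)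
      = if x != "" && !(pvOrderB.contains x) && !(pre.contains x)
        then x :: pvUnknownLoop (pre ++ [x]) es
        else pvUnknownLoop (pre ++ [x]) es := rfl

-- a single step of A's dedup build, membership-wise
theorem pv_mem_stepE (r : List String) (e x : String) :
    x ∈ pvStepE r e ↔ x ∈ r ∨ (x = e ∧ e ≠ "") := by
  unfold pvStepE
  split
  · rename_i hc
    simp only [bne, Bool.and_eq_true, Bool.not_eq_true'] at hc
    have he : e ≠ "" := by simpa using hc.1
    simp [List.mem_append, he]
  · rename_i hc
    have hor : e = "" ∨ e ∈ r := by
      by_cases h1 : e = ""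
      · exact Or.inl h1
      · right
        by_contra h2
        exact hc (by simp [h1, h2])
    constructor
    · exact Or.inl
    · rintro (h | ⟨rfl, hne⟩)
      · exact h
      · rcases hor with h | h
        · exact absurd h hne
        · exact h

-- membership in A's dedup list: nonempty and occurring among the exts
theorem pv_mem_foldE : ∀ (es : List String) (r : List String) (x : String),
    x ∈ es.foldl pvStepE r ↔ x ∈ r ∨ (x ≠ "" ∧ x ∈ es) := by
  intro es
  induction es with
  | nil => intro r x; simp
  | cons e es' ih =>
    intro r x
    rw [List.foldl_cons, ih, pv_mem_stepE]
    constructor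
    · rintro ((h | ⟨rfl, he⟩) | ⟨hne, hm⟩)
      · exact Or.inl h
      · exact Or.inr ⟨he, List.mem_cons_self ..⟩
      · exact Or.inr ⟨hne, List.mem_cons_of_mem _ hm⟩
    · rintro (h | ⟨hne, hm⟩)
      · exact Or.inl (Or.inl h)
      · rcases List.mem_cons.mp hm with rfl | hm'
        · exact Or.inl (Or.inr ⟨rfl, hne⟩)
        · exact Or.inr ⟨hne, hm'⟩

-- the non-priority part of A's dedup list is exactly B's prefix-deduped unknown loop
theorem pv_unknown_eq : ∀ (es : List String) (r pre : List String),
    (∀ x : String, x ≠ "" → (x ∈ r ↔ x ∈ pre)) →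
    (es.foldl pvStepE r).filter (fun e => !(pvOrder.contains e))
      = r.filter (fun e => !(pvOrder.contains e)) ++ pvUnknownLoop pre es := by
  intro es
  induction es with
  | nil => intro r pre _; simp [pvUnknownLoop]
  | cons x es' ih =>
    intro r pre hinv
    rw [List.foldl_cons]
    by_cases hx : x = ""
    · subst hx
      have hs : pvStepE r "" = r := by unfold pvStepE; simp
      have hu : pvUnknownLoop pre ("" :: es') = pvUnknownLoop (pre ++ [""]) es' := by
        rw [pvUnknownLoop_cons, if_neg (by simp)]
      rw [hs, hu]
      apply ih
      intro y hy
      rw [hinv y hy]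
      simp [hy]
    · by_cases hr : x ∈ r
      · have hpre : x ∈ pre := (hinv x hx).mp hr
        have hs : pvStepE r x = r := by unfold pvStepE; simp [hr]
        have hu : pvUnknownLoop pre (x :: es') = pvUnknownLoop (pre ++ [x]) es' := by
          rw [pvUnknownLoop_cons, if_neg (by simp [hpre])]
        rw [hs, hu]
        apply ih
        intro y hy
        rw [hinv y hy]
        simp only [List.mem_append, List.mem_singleton]
        exact ⟨Or.inl, fun h => h.elim id (fun he => he ▸ hpre)⟩
      · have hpre : x ∉ pre := fun h => hr ((hinv x hx).mpr h)
        have hs : pvStepE r x = r ++ [x] := by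
          unfold pvStepE
          rw [if_pos (by simp [hx, hr])]
        have hinv' : ∀ y : String, y ≠ "" → (y ∈ r ++ [x] ↔ y ∈ pre ++ [x]) := by
          intro y hy
          simp only [List.mem_append, List.mem_singleton, hinv y hy]
        by_cases hk : x ∈ pvOrder
        · have hu : pvUnknownLoop pre (x :: es') = pvUnknownLoop (pre ++ [x]) es' := by
            rw [pvUnknownLoop_cons, if_neg (by simp [show pvOrderB = pvOrder from rfl, hk])]
          rw [hs, hu, ih _ _ hinv', List.filter_append]
          rw [show List.filter (fun e => !pvOrder.contains e) [x] = [] from by simp [hk],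
              List.append_nil]
        · have hu : pvUnknownLoop pre (x :: es')
              = x :: pvUnknownLoop (pre ++ [x]) es' := by
            rw [pvUnknownLoop_cons, if_pos (by simp [hx, show pvOrderB = pvOrder from rfl, hk, hpre])]
          rw [hs, hu, ih _ _ hinv', List.filter_append]
          rw [show List.filter (fun e => !pvOrder.contains e) [x] = [x] from by simp [hk],
              List.append_assoc]
          rfl

-- every priority ext is a nonempty string
theorem pv_order_ne_empty (e : String) (h : e ∈ pvOrder) : e ≠ "" := by
  fin_cases h <;> decide

-- ===== VERDICT (by name: the statement is the Claim_ definition above) =====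
theorem extract_available_formats_spec : Claim_equal_extract_available_formats := by
  intro formats _
  unfold Spec_extract_available_formats extract_available_formats extract_available_formats_alt
  rw [pv_sorted_eq _ (pv_nodupA formats [] List.nodup_nil), pv_foldA_map]
  have hext : formats.map (fun item => PySem.Str.strip (((PySem.Dict.mk item).get? "ext").getD ""))
      = formats.map pvExtA := rfl
  rw [hext]
  congr 1
  · apply List.filter_congr
    intro e he
    have h1 : e ∈ (formats.map pvExtA).foldl pvStepE [] ↔ e ∈ formats.map pvExtA := by
      rw [pv_mem_foldE]
      simp [pv_order_ne_empty e he]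
    apply Bool.eq_iff_iff.mpr
    simpa [List.contains_iff_mem] using h1
  · rw [pv_unknown_eq (formats.map pvExtA) [] [] (fun x _ => Iff.rfl)]
    rfl
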